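-- pv_equiv track=rewrite | github.com/Nghia03092004/nghia03092004.github.io | project_euler/problem_908/solution.py | solve_dp
-- ===== SOURCE A (Python) =====
-- from math import gcd
--
-- def solve_dp(N: int):
--     """Longest increasing coprime chain via DP.
--
--     dp[i] = length of longest coprime chain ending at i.
--     dp[i] = 1 + max{dp[j] : j < i, gcd(j, i) = 1}
--     """
--     dp = [0] * (N + 1)
--     for i in range(2, N + 1):
--         dp[i] = 1
--         for j in range(2, i):
--             if gcd(j, i) == 1:
--                 dp[i] = max(dp[i], dp[j] + 1)
--     return max(dp[2:])
-- ===== SOURCE B (Python) =====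
-- def solve_dp(N: int):
--     """Closed form: consecutive integers are coprime, so 2,3,...,N is a
--     coprime chain of length N-1; and dp[i] <= i-1 by induction, so no
--     chain is longer.  Hence the answer is N-1."""
--     return N - 1
-- ===== Notes on version B (the rewrite author's own statement) =====
-- stated objective: faster
-- what changed: Replaced the O(N^2) DP over all pairs with the closed form N-1, justified by coprimality of consecutive integers and the bound dp[i] <= i-1.
-- outside the precondition, e.g. on solve_dp(1): A raises ValueError, B returns 0
import Mathlib
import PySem

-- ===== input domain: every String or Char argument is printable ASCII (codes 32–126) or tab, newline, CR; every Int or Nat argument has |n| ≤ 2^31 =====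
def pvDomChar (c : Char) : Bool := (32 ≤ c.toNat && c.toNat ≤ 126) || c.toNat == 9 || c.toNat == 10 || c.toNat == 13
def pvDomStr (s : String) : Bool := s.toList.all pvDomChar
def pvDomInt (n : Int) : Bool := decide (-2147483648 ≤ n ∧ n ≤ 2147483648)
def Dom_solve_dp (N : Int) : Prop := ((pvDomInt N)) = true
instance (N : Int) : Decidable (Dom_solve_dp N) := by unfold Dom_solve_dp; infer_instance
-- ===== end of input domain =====

-- B replaces the O(N^2) DP with the closed form N-1 (consecutive integers are coprime,
-- and dp[i] ≤ i-1), objective: faster.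

-- ===== PORT A =====
def solve_dp (N : Int) : Int :=
  let dp : List Int := List.replicate (N + 1).toNat 0
  let dp := (PySem.List.pyRange 2 (N + 1) 1).foldl (fun dp i =>
    let dp := PySem.List.pySetD dp i 1
    (PySem.List.pyRange 2 i 1).foldl (fun dp j =>
      if Int.gcd j i = 1 then
        PySem.List.pySetD dp i (max (PySem.List.pyGetD dp i 0) (PySem.List.pyGetD dp j 0 + 1))
      else dp) dp) dp
  -- Python's max(dp[2:]) raises ValueError on the empty slice (N ≤ 1); excluded by Pre_
  (PySem.List.max? (PySem.List.slice dp (some 2) none) (fun x => x)).getD 0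

-- ===== PORT B =====
def solve_dp_alt (N : Int) : Int := N - 1

-- ===== PRECONDITION & SPEC =====
-- Pre_ excludes exactly N ≤ 1, where Python's max() of the empty slice dp[2:] raises ValueError.
def Pre_solve_dp (N : Int) : Prop := 2 ≤ N
instance (N : Int) : Decidable (Pre_solve_dp N) := by unfold Pre_solve_dp; infer_instance
def pvWitness_solve_dp : Int := 5

def Spec_solve_dp (N : Int) (out : Int) : Prop := out = solve_dp_alt N
instance (N : Int) (out : Int) : Decidable (Spec_solve_dp N out) := by unfold Spec_solve_dp; infer_instance

-- ===== CLAIM (what is proved, stated in full; the proofs are below) =====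
def Claim_equal_solve_dp : Prop := ∀ (N : Int), Dom_solve_dp N → Pre_solve_dp N → Spec_solve_dp N (solve_dp N)


-- ===== LEMMAS AND PROOFS =====

-- the dp list of length L whose entry at index k is f k
def mkdp (L : Nat) (f : Nat → Int) : List Int := (List.range L).map f

-- the dp contents after the outer loop has processed i = 2 .. m-1
def fval (m : Int) (k : Nat) : Int := if 2 ≤ k ∧ (k : Int) < m then (k : Int) - 1 else 0

lemma pyGetD_mkdp (L : Nat) (f : Nat → Int) (k : Nat) (hk : k < L) :
    PySem.List.pyGetD (mkdp L f) (k : Int) 0 = f k := by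
  rw [PySem.List.pyGetD_natCast, mkdp]
  simp [List.getD_eq_getElem?_getD, hk]

lemma pySetD_mkdp (L : Nat) (f : Nat → Int) (k : Nat) (v : Int) :
    PySem.List.pySetD (mkdp L f) (k : Int) v = mkdp L (fun j => if j = k then v else f j) := by
  rw [PySem.List.pySetD_natCast, mkdp, mkdp]
  apply List.ext_getElem
  · simp
  · intro n h1 h2
    simp at h1 ⊢
    by_cases hn : n = k
    · simp [hn]
    · simp [hn, Ne.symm hn]

lemma mkdp_congr (L : Nat) (f g : Nat → Int) (h : ∀ k, k < L → f k = g k) :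
    mkdp L f = mkdp L g := by
  simp only [mkdp, List.map_inj_left, List.mem_range]
  exact fun a ha => h a ha

lemma inner_loop (L m : Nat) (_hm : 2 ≤ m) (hmL : m < L) (b : Nat) (hb : 2 ≤ b) (hbm : b ≤ m) :
    ∃ v : Int,
      (PySem.List.pyRange 2 (b : Int) 1).foldl (fun dp j =>
        if Int.gcd j (m : Int) = 1 then
          PySem.List.pySetD dp (m : Int) (max (PySem.List.pyGetD dp (m : Int) 0) (PySem.List.pyGetD dp j 0 + 1))
        else dp) (mkdp L (fun j => if j = m then 1 else fval (m : Int) j))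
        = mkdp L (fun j => if j = m then v else fval (m : Int) j) ∧
      1 ≤ v ∧ v ≤ (b : Int) - 1 ∧ (Int.gcd ((b : Int) - 1) (m : Int) = 1 → (b : Int) - 1 ≤ v) := by
  induction b with
  | zero => omega
  | succ b ih =>
    by_cases hb2 : b < 2
    · -- b + 1 = 2 : empty range
      have hb1 : b = 1 := by omega
      subst hb1
      refine ⟨1, ?_, by norm_num, by norm_num, by norm_num⟩
      rw [PySem.List.pyRange_one_eq_nil (by norm_num)]
      rfl
    · -- step at j = b
      obtain ⟨v, hfold, hv1, hv2, hv3⟩ := ih (by omega) (by omega)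
      have hsplit : PySem.List.pyRange 2 ((b : Int) + 1) 1
          = PySem.List.pyRange 2 (b : Int) 1 ++ [(b : Int)] := by
        exact PySem.List.pyRange_one_succ_right (by omega)
      have hgm : PySem.List.pyGetD (mkdp L (fun j => if j = m then v else fval (m : Int) j)) (m : Int) 0 = v := by
        rw [pyGetD_mkdp L _ m hmL]; simp
      have hgb : PySem.List.pyGetD (mkdp L (fun j => if j = m then v else fval (m : Int) j)) (b : Int) 0 = (b : Int) - 1 := by
        rw [pyGetD_mkdp L _ b (by omega)]
        have : ¬ b = m := by omega
        simp [this, fval]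
        omega
      push_cast
      rw [hsplit, List.foldl_append, hfold]
      simp only [List.foldl_cons, List.foldl_nil]
      by_cases hg : Int.gcd (b : Int) (m : Int) = 1
      · refine ⟨max v (b : Int), ?_, by omega, by omega, by intro _; simp⟩
        rw [if_pos hg, hgm, hgb, pySetD_mkdp]
        have : ((b : Int) - 1 + 1) = (b : Int) := by ring
        rw [this]
        apply mkdp_congr
        intro k _
        by_cases hk : k = m <;> simp [hk]
      · refine ⟨v, ?_, hv1, by omega, ?_⟩
        · rw [if_neg hg]
        · intro hg1
          simp only [add_sub_cancel_right] at hg1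
          exact absurd hg1 hg

lemma outer_loop (L : Nat) (m : Nat) (hm : 2 ≤ m) (hmL : m ≤ L) :
    (PySem.List.pyRange 2 (m : Int) 1).foldl (fun dp i =>
      (PySem.List.pyRange 2 i 1).foldl (fun dp j =>
        if Int.gcd j i = 1 then
          PySem.List.pySetD dp i (max (PySem.List.pyGetD dp i 0) (PySem.List.pyGetD dp j 0 + 1))
        else dp) (PySem.List.pySetD dp i 1)) (mkdp L (fval 2))
      = mkdp L (fval (m : Int)) := by
  induction m with
  | zero => omega
  | succ m ih =>
    by_cases hm2 : m < 2
    · have : m = 1 := by omega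
      subst this
      rw [PySem.List.pyRange_one_eq_nil (by norm_num)]
      rfl
    · have hmL' : m < L := by omega
      have hstep := ih (by omega) (by omega)
      push_cast
      rw [PySem.List.pyRange_one_succ_right (by omega), List.foldl_append, hstep]
      simp only [List.foldl_cons, List.foldl_nil]
      rw [pySetD_mkdp]
      have hbase : (fun j => if j = m then (1:Int) else fval (m : Int) j)
          = (fun j => if j = m then 1 else fval (m : Int) j) := rfl
      by_cases hm3 : m = 2
      · -- inner range empty for i = 2
        subst hm3
        rw [PySem.List.pyRange_one_eq_nil (by norm_num)]
        apply mkdp_congr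
        intro k hk
        by_cases hk2 : k = 2
        · simp [hk2, fval]
        · simp [hk2, fval]
          omega
      · obtain ⟨v, hfold, hv1, hv2, hv3⟩ := inner_loop L m (by omega) hmL' m (by omega) (le_refl m)
        have hcop : Int.gcd ((m : Int) - 1) (m : Int) = 1 := by
          have h1 : ((m : Int) - 1) = ((m - 1 : Nat) : Int) := by omega
          rw [h1]
          rw [Int.gcd_natCast_natCast]
          have h2 : m - 1 + 1 = m := by omega
          rw [← h2]
          show Nat.Coprime (m-1) (m-1+1); simp
        have hveq : v = (m : Int) - 1 := le_antisymm hv2 (hv3 hcop)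
        rw [hfold, hveq]
        apply mkdp_congr
        intro k hk
        by_cases hk2 : k = m
        · simp [hk2, fval]
          omega
        · simp [hk2, fval]
          omega

-- A's fold computes dp[k] = k-1 on indices 2..N, and max(dp[2:]) picks out N-1
lemma solve_dp_closed (N : Int) (h : 2 ≤ N) : solve_dp N = N - 1 := by
  obtain ⟨M, rfl⟩ : ∃ M : Nat, N = (M : Int) := ⟨N.toNat, by omega⟩
  have hM : 2 ≤ M := by exact_mod_cast h
  show (PySem.List.max? (PySem.List.slice ((PySem.List.pyRange 2 ((M:Int) + 1) 1).foldl (fun dp i => (PySem.List.pyRange 2 i 1).foldl (fun dp j => if Int.gcd j i = 1 then PySem.List.pySetD dp i (max (PySem.List.pyGetD dp i 0) (PySem.List.pyGetD dp j 0 + 1)) else dp) (PySem.List.pySetD dp i 1)) (List.replicate ((M:Int) + 1).toNat 0)) (some 2) none) (fun x => x)).getD 0 = (M:Int) - 1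
  have h1 : ((M : Int) + 1).toNat = M + 1 := by omega
  have h2 : List.replicate ((M : Int) + 1).toNat (0 : Int) = mkdp (M + 1) (fval 2) := by
    rw [h1, mkdp]
    apply List.ext_getElem
    · simp
    · intro n _ _
      simp [fval]
      omega
  have h3 : ((M : Int) + 1) = (((M + 1 : Nat) : Int)) := by push_cast; ring
  rw [h2, h3, outer_loop (M + 1) (M + 1) (by omega) (le_refl _)]
  -- the slice dp[2:]
  have h4 : PySem.List.slice (mkdp (M + 1) (fval ((M + 1 : Nat) : Int))) (some 2) none
      = (mkdp (M + 1) (fval ((M + 1 : Nat) : Int))).drop 2 := by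
    rw [PySem.List.slice_from _ (by norm_num)]
    rfl
  rw [h4]
  have h5 : (mkdp (M + 1) (fval ((M + 1 : Nat) : Int))).drop 2
      = (List.range' 2 (M - 1)).map (fval ((M + 1 : Nat) : Int)) := by
    rw [mkdp, ← List.map_drop, List.range_eq_range', List.drop_range']
    congr 1
  rw [h5]
  set f := fval ((M + 1 : Nat) : Int) with hf
  have hfk : ∀ k, 2 ≤ k → k < M + 1 → f k = (k : Int) - 1 := by
    intro k hk1 hk2
    simp [hf, fval]
    omega
  have hne : (List.range' 2 (M - 1)).map f ≠ [] := by
    simp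
    omega
  obtain ⟨mv, hmv⟩ : ∃ mv, PySem.List.max? ((List.range' 2 (M - 1)).map f) (fun x => x) = some mv := by
    rcases Option.eq_none_or_eq_some (PySem.List.max? ((List.range' 2 (M - 1)).map f) (fun x => x)) with h | h
    · exact absurd ((PySem.List.max?_eq_none_iff _ _).mp h) hne
    · exact h
  have hmem := PySem.List.max?_mem hmv
  have hmax := PySem.List.max?_isMax hmv
  rw [hmv]
  simp only [Option.getD_some]
  -- mv ∈ : mv = f k with 2 ≤ k < M+1 so mv ≤ M - 1
  have hub : mv ≤ (M : Int) - 1 := by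
    simp only [List.mem_map, List.mem_range'_1] at hmem
    obtain ⟨k, ⟨hk1, hk2⟩, hkeq⟩ := hmem
    rw [← hkeq, hfk k hk1 (by omega)]
    omega
  have hMmem : ((M : Int) - 1) ∈ (List.range' 2 (M - 1)).map f := by
    simp only [List.mem_map, List.mem_range'_1]
    exact ⟨M, ⟨by omega, by omega⟩, by rw [hfk M (by omega) (by omega)]⟩
  have hlb := hmax _ hMmem
  omega

-- ===== VERDICT (by name: the statement is the Claim_ definition above) =====
theorem solve_dp_spec : Claim_equal_solve_dp := by
  intro N _ hp
  unfold Spec_solve_dp solve_dp_alt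
  exact solve_dp_closed N hp
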